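-- pv_equiv track=rewrite | github.com/recuraki/PythonJunkTest | network/vlan_multiline.py | vlanstr
-- ===== SOURCE A (Python) =====
-- l1 = " switchport trunk allowed vlan "
--
-- l2 = " switchport trunk allowed vlan add "
--
-- def MergeSeries(liSrc):
--     if liSrc == []:
--         return []
--     if len(liSrc) == 1:
--         return liSrc
--     getCurBuf = lambda l: l[0] if l[0] == l[-1] else l[0] + "-" + l[-1]
--     liRes = list()
--     buf = list()
--     pNum = int(liSrc.pop(0))
--     buf.append(str(pNum))
--     while liSrc:
--         cNum = int(liSrc.pop(0))
--         if (cNum - pNum) != 1: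
--             liRes.append(getCurBuf(buf))
--             buf = [str(cNum)]
--         else:
--             buf.append(str(cNum))
--         pNum = cNum
--
--     if (cNum - pNum) != 1:
--         liRes.append(getCurBuf(buf))
--         buf = []
--
--     return liRes
--
-- def MergeStrToLimit(prefix, liStr, sep = ",", lim=78):
--     res = prefix
--     buf = list()
--     while liStr:
--         s = liStr.pop(0)
--         if (len(res) + len(s) ) > lim:
--             liStr.insert(0, s)
--             break
--         else:
--             buf.append(s)
--             res = prefix + sep.join(buf)
--     return res, liStr
--
-- def vlanstr(s):
--     liv = s.split(",")
--     liv.sort()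
--     liv = MergeSeries(liv)
--     r, liv = MergeStrToLimit(l1, liv)
--     while liv:
--         out, liv = MergeStrToLimit(l2, liv)
--         r = r + "\n" + out
--     return(r)
-- ===== SOURCE B (Python) =====
-- l1 = " switchport trunk allowed vlan "
--
-- l2 = " switchport trunk allowed vlan add "
--
-- def vlanstr(s):
--     fields = sorted(s.split(","))
--     if len(fields) == 1:
--         parts = fields
--     else:
--         runs = []
--         for v in [int(f) for f in fields]:
--             if runs and v - runs[-1][1] == 1:
--                 runs[-1] = (runs[-1][0], v)
--             else:
--                 runs.append((v, v))
--         parts = [str(a) if a == b else str(a) + "-" + str(b) for a, b in runs]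
--     out = l1 + parts[0]
--     cur = len(out)
--     for p in parts[1:]:
--         if cur + len(p) > 78:
--             out += "\n" + l2 + p
--             cur = len(l2) + len(p)
--         else:
--             out += "," + p
--             cur += 1 + len(p)
--     return out
-- ===== Notes on version B (the rewrite author's own statement) =====
-- stated objective: simpler
-- what changed: A's flush-a-string-buffer run merger and its repeated pop/insert MergeStrToLimit line packer are replaced by one pass that builds explicit (first,last) run pairs, formats them in a second pass, and a single fold that appends to the output while tracking only the current line length.
import Mathlib
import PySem

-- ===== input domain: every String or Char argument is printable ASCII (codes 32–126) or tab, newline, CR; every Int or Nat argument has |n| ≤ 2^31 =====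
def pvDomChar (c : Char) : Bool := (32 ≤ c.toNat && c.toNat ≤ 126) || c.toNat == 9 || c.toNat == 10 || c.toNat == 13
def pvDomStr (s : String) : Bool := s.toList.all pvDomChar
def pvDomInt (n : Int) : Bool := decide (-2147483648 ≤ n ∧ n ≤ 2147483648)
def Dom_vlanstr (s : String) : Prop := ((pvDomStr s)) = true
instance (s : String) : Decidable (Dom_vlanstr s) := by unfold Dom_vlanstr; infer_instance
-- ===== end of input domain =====

-- B replaces A's flush-buffer run merger by an explicit run-pair pass and A's pop/insert
-- line-packer by one fold carrying the current line length (objective: simpler).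

-- ===== PORT A =====
def pvL1 : String := " switchport trunk allowed vlan "
def pvL2 : String := " switchport trunk allowed vlan add "

-- getCurBuf = lambda l: l[0] if l[0] == l[-1] else l[0] + "-" + l[-1]  (buf is never empty when called)
def pvGetCurBuf (l : List String) : String :=
  if PySem.List.pyGetD l 0 "" = PySem.List.pyGetD l (-1) "" then PySem.List.pyGetD l 0 ""
  else PySem.List.pyGetD l 0 "" ++ "-" ++ PySem.List.pyGetD l (-1) ""

-- the `while liSrc:` loop of MergeSeries plus the final flush (where cNum = pNum, so 0 ≠ 1)
def pvMergeLoop : List String → Int → List String → List String → List String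
  | [], pNum, buf, liRes => if pNum - pNum ≠ 1 then liRes ++ [pvGetCurBuf buf] else liRes
  | c :: rest, pNum, buf, liRes =>
      let cNum := (PySem.Int.ofStr? c).getD 0
      if cNum - pNum ≠ 1 then pvMergeLoop rest cNum [PySem.Int.toStr cNum] (liRes ++ [pvGetCurBuf buf])
      else pvMergeLoop rest cNum (buf ++ [PySem.Int.toStr cNum]) liRes

def pvMergeSeries (liSrc : List String) : List String :=
  if liSrc = [] then []
  else if PySem.List.len liSrc == 1 then liSrc
  else match liSrc with
    | [] => []
    | p :: rest =>
        let pNum := (PySem.Int.ofStr? p).getD 0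
        pvMergeLoop rest pNum [PySem.Int.toStr pNum] []

-- MergeStrToLimit's while loop; A only calls it with the defaults sep = "," and lim = 78, inlined here
def pvMSTL (pfx : String) : List String → List String → String → String × List String
  | [], _buf, res => (res, [])
  | s :: rest, buf, res =>
      if PySem.Str.len res + PySem.Str.len s > 78 then (res, s :: rest)
      else pvMSTL pfx rest (buf ++ [s]) (pfx ++ PySem.Str.join "," (buf ++ [s]))

-- the `while liv:` loop of vlanstr; fuel bounds the iteration count (each iteration that
-- makes progress consumes at least one element, which Pre_ guarantees)
def pvOuter : Nat → String → List String → String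
  | 0, r, _ => r
  | _ + 1, r, [] => r
  | fuel + 1, r, liv =>
      let p := pvMSTL pvL2 liv [] pvL2
      pvOuter fuel (r ++ "\n" ++ p.1) p.2

def vlanstr (s : String) : String :=
  let liv := (PySem.Str.split? s ",").getD []
  let liv := PySem.List.sorted liv (fun x => x) false
  let liv := pvMergeSeries liv
  let p := pvMSTL pvL1 liv [] pvL1
  pvOuter (p.2.length + 1) p.1 p.2

-- ===== PORT B =====
def pvFmtRun (p : Int × Int) : String :=
  let sa := PySem.Int.toStr p.1
  let sb := PySem.Int.toStr p.2
  if sa = sb then sa else sa ++ "-" ++ sb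

def pvRunsStep (rs : List (Int × Int)) (v : Int) : List (Int × Int) :=
  match rs.getLast? with
  | some (a, b) => if v - b == 1 then rs.dropLast ++ [(a, v)] else rs ++ [(v, v)]
  | none => [(v, v)]

def pvWrapStep (st : String × Int) (p : String) : String × Int :=
  if st.2 + PySem.Str.len p > 78 then
    (st.1 ++ "\n" ++ pvL2 ++ p, PySem.Str.len pvL2 + PySem.Str.len p)
  else (st.1 ++ "," ++ p, st.2 + 1 + PySem.Str.len p)

def vlanstr_alt (s : String) : String :=
  let fields := PySem.List.sorted ((PySem.Str.split? s ",").getD []) (fun x => x) false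
  let parts :=
    if fields.length == 1 then fields
    else
      let nums := fields.map (fun f => (PySem.Int.ofStr? f).getD 0)
      (nums.foldl pvRunsStep []).map pvFmtRun
  match parts with
  | [] => pvL1   -- unreachable: str.split never yields an empty list
  | p0 :: rest => (rest.foldl pvWrapStep (pvL1 ++ p0, PySem.Str.len (pvL1 ++ p0))).1

-- ===== PRECONDITION & SPEC =====
-- the parsed integer values of all fields (for the precondition only)
def pvVals (s : String) : List Int :=
  ((PySem.Str.split? s ",").getD []).map (fun f => (PySem.Int.ofStr? f).getD 0)

-- Pre_ excludes inputs where int(field) raises ValueError, and the divergence-prone inputs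
-- on which A's separator-less line packer can loop forever: a lone comma-free field longer
-- than 47 chars, a value of more than 43 digits, or a value of 22+ digits with a numeric
-- neighbour (v-1 or v+1) among the values — the last two shapes can form a piece wider than
-- a continuation line; they over-exclude only the huge-number inputs whose oversized piece happens
-- to be swallowed by the first line (an exact characterisation would simulate the packer);
-- those are listed in the claim's cites.
def Pre_vlanstr (s : String) : Prop :=
  if ((PySem.Str.split? s ",").getD []).length ≤ 1 then
    ∀ f ∈ (PySem.Str.split? s ",").getD [], PySem.Str.len f ≤ 47
  else
    (∀ f ∈ (PySem.Str.split? s ",").getD [], (PySem.Int.ofStr? f).isSome = true) ∧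
    (∀ v ∈ pvVals s, PySem.Str.len (PySem.Int.toStr v) ≤ 43 ∧
      (PySem.Str.len (PySem.Int.toStr v) ≤ 21 ∨ ((v + 1) ∉ pvVals s ∧ (v - 1) ∉ pvVals s)))
instance (s : String) : Decidable (Pre_vlanstr s) := by unfold Pre_vlanstr; infer_instance

def pvWitness_vlanstr : String := "5,3,2,1,4,10"

def Spec_vlanstr (s : String) (out : String) : Prop := out = vlanstr_alt s
instance (s : String) (out : String) : Decidable (Spec_vlanstr s out) := by unfold Spec_vlanstr; infer_instance

-- ===== CLAIM (what is proved, stated in full; the proofs are below) =====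
def Claim_equal_vlanstr : Prop := ∀ (s : String), Dom_vlanstr s → Pre_vlanstr s → Spec_vlanstr s (vlanstr s)

-- ===== LEMMAS AND PROOFS =====

-- common specification of both run builders
def pvGoRuns : List Int → Int → Int → List (Int × Int)
  | [], a, b => [(a, b)]
  | c :: rest, a, b => if c - b ≠ 1 then (a, b) :: pvGoRuns rest c c else pvGoRuns rest a c

theorem pvGoRuns_ne_nil (xs : List Int) (a b : Int) : pvGoRuns xs a b ≠ [] := by
  induction xs generalizing a b with
  | nil => simp [pvGoRuns]
  | cons c rest ih => simp only [pvGoRuns]; split <;> simp [ih]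

-- every run endpoint is a value, and a widened run's inner neighbours are values too
theorem pvGoRuns_run_mem (xs : List Int) (a b : Int) (S : List Int)
    (hxs : ∀ x ∈ xs, x ∈ S) (ha : a ∈ S) (hb : b ∈ S)
    (hab : a ≠ b → (a + 1) ∈ S ∧ (b - 1) ∈ S) :
    ∀ p ∈ pvGoRuns xs a b,
      p.1 ∈ S ∧ p.2 ∈ S ∧ (p.1 ≠ p.2 → (p.1 + 1) ∈ S ∧ (p.2 - 1) ∈ S) := by
  induction xs generalizing a b with
  | nil =>
    intro p hp
    simp [pvGoRuns] at hp
    subst hp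
    exact ⟨ha, hb, hab⟩
  | cons c rest ih =>
    intro p hp
    simp only [pvGoRuns] at hp
    split at hp
    · rcases List.mem_cons.mp hp with rfl | hp
      · exact ⟨ha, hb, hab⟩
      · exact ih c c (fun x hx => hxs x (by simp [hx])) (hxs c (by simp)) (hxs c (by simp))
          (by simp) p hp
    · rename_i hcb
      have hc1 : c = b + 1 := by omega
      have hcS : c ∈ S := hxs c (by simp)
      refine ih a c (fun x hx => hxs x (by simp [hx])) ha hcS ?_ p hp
      intro hac
      refine ⟨?_, by rw [show c - 1 = b by omega]; exact hb⟩
      by_cases hab' : a = b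
      · rw [hab', ← hc1]; exact hcS
      · exact (hab hab').1

theorem pvGetD_head (buf : List String) (x : String) (h : buf.head? = some x) :
    PySem.List.pyGetD buf 0 "" = x := by
  cases buf with
  | nil => simp at h
  | cons a t => simp at h; simp [PySem.List.pyGetD, h]

theorem pvGetD_last (buf : List String) (y : String) (h : buf.getLast? = some y) :
    PySem.List.pyGetD buf (-1) "" = y := by
  have hne : buf ≠ [] := by rintro rfl; simp at h
  have hl : 0 < buf.length := List.length_pos_iff.mpr hne
  rw [PySem.List.pyGetD_neg_ofNat buf 1 "" (by omega) (by omega)]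
  rw [List.getLast?_eq_getElem?] at h
  simp [List.getElem?_eq_some_iff] at h
  exact h.2

theorem pvGetCurBuf_eq (buf : List String) (a b : Int)
    (hh : buf.head? = some (PySem.Int.toStr a)) (hl : buf.getLast? = some (PySem.Int.toStr b)) :
    pvGetCurBuf buf = pvFmtRun (a, b) := by
  unfold pvGetCurBuf pvFmtRun
  rw [pvGetD_head buf _ hh, pvGetD_last buf _ hl]

theorem pvMergeLoop_eq (xs : List String) (a b : Int) (buf liRes : List String)
    (hh : buf.head? = some (PySem.Int.toStr a)) (hl : buf.getLast? = some (PySem.Int.toStr b)) :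
    pvMergeLoop xs b buf liRes
      = liRes ++ (pvGoRuns (xs.map (fun f => (PySem.Int.ofStr? f).getD 0)) a b).map pvFmtRun := by
  induction xs generalizing a b buf liRes with
  | nil =>
    simp [pvMergeLoop, pvGoRuns, pvGetCurBuf_eq buf a b hh hl]
  | cons c rest ih =>
    simp only [pvMergeLoop, List.map_cons, pvGoRuns]
    by_cases hc : (PySem.Int.ofStr? c).getD 0 - b ≠ 1
    · simp only [if_pos hc]
      rw [ih ((PySem.Int.ofStr? c).getD 0) ((PySem.Int.ofStr? c).getD 0) _ _ (by simp) (by simp), pvGetCurBuf_eq buf a b hh hl]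
      simp
    · simp only [if_neg hc]
      rw [ih a ((PySem.Int.ofStr? c).getD 0) _ _ (by cases buf <;> simp_all) (by simp)]

theorem pvRuns_foldl (xs : List Int) (acc : List (Int × Int)) (a b : Int) :
    List.foldl pvRunsStep (acc ++ [(a, b)]) xs = acc ++ pvGoRuns xs a b := by
  induction xs generalizing acc a b with
  | nil => simp [pvGoRuns]
  | cons c rest ih =>
    have hstep : pvRunsStep (acc ++ [(a, b)]) c
        = if c - b = 1 then acc ++ [(a, c)] else (acc ++ [(a, b)]) ++ [(c, c)] := by
      simp [pvRunsStep]
    rw [List.foldl_cons, hstep]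
    by_cases hc : c - b = 1
    · rw [if_pos hc, ih acc a c]
      simp [pvGoRuns, hc]
    · rw [if_neg hc, ih (acc ++ [(a, b)]) c c]
      simp [pvGoRuns, hc]

theorem pvRuns_start (n0 : Int) (ns : List Int) :
    List.foldl pvRunsStep [] (n0 :: ns) = pvGoRuns ns n0 n0 := by
  have h0 : pvRunsStep [] n0 = [] ++ [(n0, n0)] := by simp [pvRunsStep]
  rw [List.foldl_cons, h0, pvRuns_foldl]
  simp

-- both mergers compute the same list of pieces
theorem pvMerge_eq (fields : List String) :
    pvMergeSeries fields
      = (if fields.length == 1 then fields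
         else ((fields.map (fun f => (PySem.Int.ofStr? f).getD 0)).foldl pvRunsStep []).map pvFmtRun) := by
  cases fields with
  | nil => simp [pvMergeSeries]
  | cons p rest =>
    cases rest with
    | nil => simp [pvMergeSeries, PySem.List.len]
    | cons q u =>
      simp only [pvMergeSeries]
      rw [if_neg (by simp), if_neg (by simp [PySem.List.len]; omega), if_neg (by simp)]
      rw [pvMergeLoop_eq (q :: u) ((PySem.Int.ofStr? p).getD 0) ((PySem.Int.ofStr? p).getD 0)
            _ [] (by simp) (by simp)]
      rw [List.map_cons, List.map_cons, pvRuns_start]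
      simp

-- ----- the line packer -----

def pvTakeLn : String → List String → String × List String
  | res, [] => (res, [])
  | res, s :: t =>
      if PySem.Str.len res + PySem.Str.len s > 78 then (res, s :: t)
      else pvTakeLn (res ++ "," ++ s) t

def pvTailStr : Int → List String → String
  | _, [] => ""
  | cur, p :: t =>
      if cur + PySem.Str.len p > 78 then
        "\n" ++ pvL2 ++ p ++ pvTailStr (PySem.Str.len pvL2 + PySem.Str.len p) t
      else "," ++ p ++ pvTailStr (cur + 1 + PySem.Str.len p) t

theorem pvJoin_snoc (buf : List String) (s : String) (h : buf ≠ []) :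
    PySem.Str.join "," (buf ++ [s]) = PySem.Str.join "," buf ++ "," ++ s := by
  induction buf with
  | nil => simp at h
  | cons a t ih =>
    cases t with
    | nil =>
      apply String.toList_inj.mp
      simp [PySem.Str.toList_join, PySem.Chars.join_cons_cons, PySem.Chars.join_singleton]
    | cons b u =>
      apply String.toList_inj.mp
      have := congrArg String.toList (ih (by simp))
      simp [PySem.Str.toList_join, PySem.Chars.join_cons_cons] at this ⊢
      simpa using this

theorem pvMSTL_takeLn (P : String) (xs buf : List String) (h : buf ≠ []) :
    pvMSTL P xs buf (P ++ PySem.Str.join "," buf) = pvTakeLn (P ++ PySem.Str.join "," buf) xs := by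
  induction xs generalizing buf with
  | nil => simp [pvMSTL, pvTakeLn]
  | cons s t ih =>
    simp only [pvMSTL, pvTakeLn]
    split
    · rfl
    · rw [ih (buf ++ [s]) (by simp)]
      have : P ++ PySem.Str.join "," (buf ++ [s])
          = P ++ PySem.Str.join "," buf ++ "," ++ s := by
        rw [pvJoin_snoc buf s h]
        simp [String.append_assoc]
      rw [this]

theorem pvTakeLn_rest_len (res : String) (xs : List String) :
    (pvTakeLn res xs).2.length ≤ xs.length := by
  induction xs generalizing res with
  | nil => simp [pvTakeLn]
  | cons s t ih =>
    simp only [pvTakeLn]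
    split
    · simp
    · exact le_trans (ih _) (by simp)

theorem pvWrap_foldl (xs : List String) (out : String) (cur : Int) :
    (List.foldl pvWrapStep (out, cur) xs).1 = out ++ pvTailStr cur xs := by
  induction xs generalizing out cur with
  | nil => simp [pvTailStr]
  | cons p t ih =>
    simp only [List.foldl_cons, pvWrapStep, pvTailStr]
    split
    · rw [ih]; simp [String.append_assoc]
    · rw [ih]; simp [String.append_assoc]

theorem pvLenL2 : PySem.Str.len pvL2 = 35 := by decide

theorem pvMSTL_start (P s : String) (t : List String)
    (h1 : ¬ (PySem.Str.len P + PySem.Str.len s > 78)) :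
    pvMSTL P (s :: t) [] P = pvTakeLn (P ++ s) t := by
  have hjs : PySem.Str.join "," [s] = s := by
    apply String.toList_inj.mp
    simp [PySem.Str.toList_join, PySem.Chars.join_singleton]
  have h2 := pvMSTL_takeLn P t [s] (by simp)
  rw [hjs] at h2
  simp only [pvMSTL, List.nil_append]
  rw [if_neg h1, hjs]
  exact h2

theorem pvOuter_tail (xs : List String) :
    ∀ (res r : String) (fuel : Nat), (pvTakeLn res xs).2.length < fuel →
    (∀ p ∈ xs, PySem.Str.len p ≤ 43) →
    pvOuter fuel (r ++ (pvTakeLn res xs).1) (pvTakeLn res xs).2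
      = r ++ res ++ pvTailStr (PySem.Str.len res) xs := by
  induction xs with
  | nil =>
    intro res r fuel hf hb
    cases fuel with
    | zero => simp [pvTakeLn] at hf
    | succ m => simp [pvTakeLn, pvOuter, pvTailStr, String.append_empty]
  | cons s t ih =>
    intro res r fuel hf hb
    have hs : PySem.Str.len s ≤ 43 := hb s (by simp)
    by_cases hbr : PySem.Str.len res + PySem.Str.len s > 78
    · -- line break: A starts a fresh l2 line that takes s, B emits "\n" ++ l2 ++ s
      have htk : pvTakeLn res (s :: t) = (res, s :: t) := by
        simp only [pvTakeLn]; rw [if_pos hbr]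
      rw [htk] at hf ⊢
      cases fuel with
      | zero => simp at hf
      | succ m =>
        have hm : pvMSTL pvL2 (s :: t) [] pvL2 = pvTakeLn (pvL2 ++ s) t :=
          pvMSTL_start pvL2 s t (by rw [pvLenL2]; omega)
        show pvOuter (m + 1) (r ++ res) (s :: t) = _
        rw [show pvOuter (m + 1) (r ++ res) (s :: t)
              = pvOuter m (r ++ res ++ "\n" ++ (pvMSTL pvL2 (s :: t) [] pvL2).1)
                  (pvMSTL pvL2 (s :: t) [] pvL2).2 from rfl]
        rw [hm]
        have hfu : (pvTakeLn (pvL2 ++ s) t).2.length < m := by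
          have := pvTakeLn_rest_len (pvL2 ++ s) t
          simp at hf; omega
        rw [show r ++ res ++ "\n" ++ (pvTakeLn (pvL2 ++ s) t).1
              = (r ++ res ++ "\n") ++ (pvTakeLn (pvL2 ++ s) t).1 by simp [String.append_assoc]]
        rw [ih (pvL2 ++ s) (r ++ res ++ "\n") m hfu (fun p hp => hb p (by simp [hp]))]
        have hrhs : pvTailStr (PySem.Str.len res) (s :: t)
            = "\n" ++ pvL2 ++ s ++ pvTailStr (PySem.Str.len pvL2 + PySem.Str.len s) t := by
          simp only [pvTailStr]; rw [if_pos hbr]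
        rw [hrhs, PySem.Str.len_append]
        simp [String.append_assoc]
    · -- s fits on the current line
      have htk : pvTakeLn res (s :: t) = pvTakeLn (res ++ "," ++ s) t := by
        simp only [pvTakeLn]; rw [if_neg hbr]
      rw [htk] at hf ⊢
      rw [ih (res ++ "," ++ s) r fuel hf (fun p hp => hb p (by simp [hp]))]
      have hrhs : pvTailStr (PySem.Str.len res) (s :: t)
          = "," ++ s ++ pvTailStr (PySem.Str.len res + 1 + PySem.Str.len s) t := by
        simp only [pvTailStr]; rw [if_neg hbr]
      rw [hrhs]
      have hlen : PySem.Str.len (res ++ "," ++ s) = PySem.Str.len res + 1 + PySem.Str.len s := by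
        simp; omega
      rw [hlen]
      simp [String.append_assoc]

theorem pvLenL1 : PySem.Str.len pvL1 = 31 := by decide
theorem pvLenDash : PySem.Str.len "-" = 1 := by decide

theorem pvFmtRun_len (a b : Int)
    (h1 : PySem.Str.len (PySem.Int.toStr a) ≤ 43)
    (h2 : a ≠ b → PySem.Str.len (PySem.Int.toStr a) ≤ 21 ∧ PySem.Str.len (PySem.Int.toStr b) ≤ 21) :
    PySem.Str.len (pvFmtRun (a, b)) ≤ 43 := by
  unfold pvFmtRun
  dsimp only
  split
  · exact h1
  · rename_i hne
    have hab : a ≠ b := fun h => hne (by rw [h])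
    obtain ⟨ha, hb⟩ := h2 hab
    simp only [PySem.Str.len_append, pvLenDash]
    omega

-- the wrapped result for a non-empty piece list whose head fits on the first line
theorem pvWrap_eq (p0 : String) (rest : List String)
    (h0 : ¬ (PySem.Str.len pvL1 + PySem.Str.len p0 > 78))
    (hb : ∀ p ∈ rest, PySem.Str.len p ≤ 43) :
    pvOuter ((pvMSTL pvL1 (p0 :: rest) [] pvL1).2.length + 1)
        (pvMSTL pvL1 (p0 :: rest) [] pvL1).1 (pvMSTL pvL1 (p0 :: rest) [] pvL1).2
      = (List.foldl pvWrapStep (pvL1 ++ p0, PySem.Str.len (pvL1 ++ p0)) rest).1 := by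
  rw [pvMSTL_start pvL1 p0 rest h0]
  have h := pvOuter_tail rest (pvL1 ++ p0) "" ((pvTakeLn (pvL1 ++ p0) rest).2.length + 1)
      (by omega) hb
  simp only [String.empty_append] at h
  rw [h, pvWrap_foldl]

theorem vlanstr_spec0 (s : String) (hpre : Pre_vlanstr s) : vlanstr s = vlanstr_alt s := by
  unfold Pre_vlanstr at hpre
  simp only [vlanstr, vlanstr_alt]
  set F0 := (PySem.Str.split? s ",").getD [] with hF0
  set L := PySem.List.sorted F0 (fun x => x) false with hL
  have hlen : L.length = F0.length := PySem.List.length_sorted ..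
  have hmem : ∀ f ∈ L, f ∈ F0 := fun f hf => (PySem.List.mem_sorted ..).mp hf
  rw [pvMerge_eq]
  match hLc : L with
  | [] =>
    simp only [List.length_nil]
    norm_num
    simp [pvMSTL, pvOuter]
  | [x] =>
    have hx : PySem.Str.len x ≤ 47 := by
      have h1 : F0.length ≤ 1 := by rw [← hlen]; simp
      rw [if_pos h1] at hpre
      exact hpre x (hmem x (by simp))
    simp only [List.length_cons, List.length_nil]
    norm_num
    have h0 : ¬ (PySem.Str.len pvL1 + PySem.Str.len x > 78) := by rw [pvLenL1]; omega
    have hj : PySem.Str.join "," [x] = x := by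
      apply String.toList_inj.mp
      simp [PySem.Str.toList_join, PySem.Chars.join_singleton]
    simp only [pvMSTL, List.nil_append]
    rw [if_neg h0, hj]
    simp [pvOuter]
  | f0 :: f1 :: fr =>
    have h1 : ¬ (F0.length ≤ 1) := by rw [← hlen]; simp
    rw [if_neg h1] at hpre
    obtain ⟨_hparse, hcond⟩ := hpre
    rw [if_neg (by simp)]
    set nums := (f0 :: f1 :: fr).map (fun f => (PySem.Int.ofStr? f).getD 0) with hnums
    -- every element of nums is a parsed value of the input
    have hV : ∀ v ∈ nums, v ∈ pvVals s := by
      intro v hv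
      rw [hnums] at hv
      rcases List.mem_map.mp hv with ⟨f, hf, rfl⟩
      exact List.mem_map.mpr ⟨f, hmem f hf, rfl⟩
    set ps := (List.foldl pvRunsStep [] nums).map pvFmtRun with hps
    have hpsb : ∀ p ∈ ps, PySem.Str.len p ≤ 43 := by
      intro p hp
      rw [hps] at hp
      rcases List.mem_map.mp hp with ⟨⟨a, b⟩, hab, rfl⟩
      rw [hnums, List.map_cons, pvRuns_start] at hab
      have hrm := pvGoRuns_run_mem ((f1 :: fr).map (fun f => (PySem.Int.ofStr? f).getD 0))
          ((PySem.Int.ofStr? f0).getD 0) ((PySem.Int.ofStr? f0).getD 0) nums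
          (fun x hx => by rw [hnums, List.map_cons]; exact List.mem_cons_of_mem _ hx)
          (by rw [hnums, List.map_cons]; exact List.mem_cons_self)
          (by rw [hnums, List.map_cons]; exact List.mem_cons_self)
          (by simp) (a, b) hab
      obtain ⟨haS, hbS, hneS⟩ := hrm
      refine pvFmtRun_len a b ((hcond a (hV a haS)).1) ?_
      intro hab'
      obtain ⟨ha1, hb1⟩ := hneS hab'
      constructor
      · rcases (hcond a (hV a haS)).2 with h | h
        · exact h
        · exact absurd (hV _ ha1) h.1
      · rcases (hcond b (hV b hbS)).2 with h | h
        · exact h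
        · exact absurd (hV _ hb1) h.2
    have hpsne : ps ≠ [] := by
      rw [hps, hnums, List.map_cons, pvRuns_start]
      simp [pvGoRuns_ne_nil]
    match hpsc : ps with
    | [] => exact absurd rfl hpsne
    | p0 :: rest =>
      have hp0 : PySem.Str.len p0 ≤ 43 := hpsb p0 (by exact List.mem_cons_self)
      have hrb : ∀ p ∈ rest, PySem.Str.len p ≤ 43 :=
        fun p hp => hpsb p (List.mem_cons_of_mem _ hp)
      exact pvWrap_eq p0 rest (by rw [pvLenL1]; omega) hrb

-- ===== VERDICT (by name: the statement is the Claim_ definition above) =====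
theorem vlanstr_spec : Claim_equal_vlanstr := by
  intro s _ hpre
  exact vlanstr_spec0 s hpre
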